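-- pv_equiv track=rewrite | github.com/aujuhi/tdt4310project | articleAnalysis.py | find_words_with_negations
-- ===== SOURCE A (Python) =====
-- from collections import Counter
--
-- def find_words_with_negations(articles, lexicon_pos, lexicon_neg):
--     """
--     searches for words in lexicon, ignores negated words
--     :param articles: list or bucket of articles
--     :param lexicon_pos: sentiment lexicon with positive words
--     :param lexicon_neg: sentiment lexicon with negative words
--     :return: counter object
--     """
--     lst_pos = []
--     lst_neg = []
--     for x in articles:
--         for ns in lexicon_pos.keys():
--             ns = ns.lower()
--             if ns in x:
--                 position = x.index(ns)
--                 if position > 0: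
--                     if any(negation in x[position - 1] for negation in ["not", "n't", "no"]):
--                         continue
--                 lst_pos.append(ns)
--         for ns in lexicon_neg.keys():
--             ns = ns.lower()
--             if ns in x:
--                 position = x.index(ns)
--                 if position > 0:
--                     if any(negation in x[position - 1] for negation in ["not", "n't", "no"]):
--                         continue
--                 lst_neg.append(ns)
--     return Counter([i for i in lst_pos]), Counter([i for i in lst_neg])
-- ===== SOURCE B (Python) =====
-- from collections import Counter
--
-- def find_words_with_negations(articles, lexicon_pos, lexicon_neg):
--     """
--     Streaming re-implementation: instead of searching each article for every
--     lexicon key (membership + .index per key), scan each article once left to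
--     right, classifying every token at its FIRST occurrence as kept or dropped
--     from the negation state of the previous token; then tally the lowered
--     lexicon keys against the article's kept-token set.
--     """
--     negations = ("not", "n't", "no")
--
--     def kept_tokens(article):
--         kept = set()
--         dropped = set()
--         prev_negated = False  # position 0 is never negated
--         for tok in article:
--             if tok not in kept and tok not in dropped:
--                 (dropped if prev_negated else kept).add(tok)
--             prev_negated = any(n in tok for n in negations)
--         return kept
--
--     pos_keys = [k.lower() for k in lexicon_pos]
--     neg_keys = [k.lower() for k in lexicon_neg]
--     result_pos = Counter()
--     result_neg = Counter()
--     for kept in map(kept_tokens, articles):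
--         result_pos.update(t for t in pos_keys if t in kept)
--         result_neg.update(t for t in neg_keys if t in kept)
--     return result_pos, result_neg
-- ===== Notes on version B (the rewrite author's own statement) =====
-- stated objective: faster
-- what changed: A searches each article once per lexicon key (membership test, .index, then a positional negation lookup); B never searches: it streams each article once left to right, classifying every token at its first occurrence as kept or dropped from the carried previous-token negation state, then tallies the lowered lexicon keys against that kept-token set.
import Mathlib
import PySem

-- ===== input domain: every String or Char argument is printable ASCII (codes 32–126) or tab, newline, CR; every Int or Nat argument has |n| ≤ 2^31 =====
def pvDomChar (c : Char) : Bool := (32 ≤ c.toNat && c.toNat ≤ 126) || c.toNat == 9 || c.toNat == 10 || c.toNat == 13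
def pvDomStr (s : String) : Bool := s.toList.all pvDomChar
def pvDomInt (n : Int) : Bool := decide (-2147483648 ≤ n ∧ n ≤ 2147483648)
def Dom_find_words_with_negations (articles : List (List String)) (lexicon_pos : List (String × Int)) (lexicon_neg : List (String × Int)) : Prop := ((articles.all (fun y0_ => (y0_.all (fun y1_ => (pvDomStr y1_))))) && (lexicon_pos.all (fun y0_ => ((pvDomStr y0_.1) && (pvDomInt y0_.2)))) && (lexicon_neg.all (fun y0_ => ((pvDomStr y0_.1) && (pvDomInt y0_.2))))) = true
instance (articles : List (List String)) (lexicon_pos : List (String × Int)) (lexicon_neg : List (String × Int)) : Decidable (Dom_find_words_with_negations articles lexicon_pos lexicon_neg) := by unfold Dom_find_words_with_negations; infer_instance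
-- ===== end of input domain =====

-- B replaces A's per-lexicon-key article search (membership test + .index + position lookup)
-- by one streaming left-to-right scan per article that classifies each token at its first
-- occurrence as kept/dropped, then filters the lexicon keys against that set (objective: faster).

-- ===== PORT A =====
-- x[position - 1]: here 0 < position and position = x.index(ns) < len(x), so List.getD is exact.
def pvNegPrev (x : List String) (position : Nat) : Bool :=
  ["not", "n't", "no"].any (fun negation => PySem.Str.isIn negation (x.getD (position - 1) ""))

-- one inner `for ns in lexicon.keys():` loop of A (x.index(ns) is only reached when ns ∈ x,
-- so the `none` arm of index? is unreachable)
def pvScanA (x : List String) (keys : List String) (lst : List String) : List String :=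
  keys.foldl (fun lst ns0 =>
    let ns := PySem.Str.lower ns0
    if ns ∈ x then
      match PySem.List.index? x ns with
      | some position =>
          if decide (0 < position) && pvNegPrev x position then lst else lst ++ [ns]
      | none => lst
    else lst) lst

def find_words_with_negations (articles : List (List String)) (lexicon_pos : List (String × Int)) (lexicon_neg : List (String × Int)) : (List (String × Int)) × (List (String × Int)) :=
  let lsts := articles.foldl (fun (acc : List String × List String) x =>
      (pvScanA x (PySem.Dict.ofList lexicon_pos).keys acc.1,
       pvScanA x (PySem.Dict.ofList lexicon_neg).keys acc.2)) ([], [])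
  ((PySem.Dict.counter (lsts.1.map (fun i => i))).items,
   (PySem.Dict.counter (lsts.2.map (fun i => i))).items)

-- ===== PORT B =====
-- any(n in tok for n in negations)
def pvHasNeg (tok : String) : Bool :=
  ["not", "n't", "no"].any (fun n => PySem.Str.isIn n tok)

-- one iteration of kept_tokens' scan; state = (kept, dropped, prev_negated)
def pvKeptStep (st : PySem.Set String × PySem.Set String × Bool) (tok : String) :
    PySem.Set String × PySem.Set String × Bool :=
  let st' :=
    if st.1.contains tok || st.2.1.contains tok then (st.1, st.2.1)
    else if st.2.2 then (st.1, PySem.Set.add st.2.1 tok)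
    else (PySem.Set.add st.1 tok, st.2.1)
  (st'.1, st'.2, pvHasNeg tok)

-- kept_tokens(article)
def pvKeptTokens (article : List String) : PySem.Set String :=
  (article.foldl pvKeptStep (PySem.Set.empty, PySem.Set.empty, false)).1

-- result.update(iterable): Counter.update adds one per element
def pvUpdate (d : PySem.Dict String Int) (l : List String) : PySem.Dict String Int :=
  l.foldl (fun d t => d.modify t 0 (· + 1)) d

def find_words_with_negations_alt (articles : List (List String)) (lexicon_pos : List (String × Int)) (lexicon_neg : List (String × Int)) : (List (String × Int)) × (List (String × Int)) :=
  let pos_keys := (PySem.Dict.ofList lexicon_pos).keys.map PySem.Str.lower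
  let neg_keys := (PySem.Dict.ofList lexicon_neg).keys.map PySem.Str.lower
  let results := articles.foldl
    (fun (results : PySem.Dict String Int × PySem.Dict String Int) article =>
      let kept := pvKeptTokens article
      (pvUpdate results.1 (pos_keys.filter (fun t => kept.contains t)),
       pvUpdate results.2 (neg_keys.filter (fun t => kept.contains t))))
    (PySem.Dict.empty, PySem.Dict.empty)
  (results.1.items, results.2.items)

-- ===== PRECONDITION & SPEC =====
def Spec_find_words_with_negations (articles : List (List String)) (lexicon_pos : List (String × Int)) (lexicon_neg : List (String × Int)) (out : (List (String × Int)) × (List (String × Int))) : Prop := out = find_words_with_negations_alt articles lexicon_pos lexicon_neg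
instance (articles : List (List String)) (lexicon_pos : List (String × Int)) (lexicon_neg : List (String × Int)) (out : (List (String × Int)) × (List (String × Int))) : Decidable (Spec_find_words_with_negations articles lexicon_pos lexicon_neg out) := by unfold Spec_find_words_with_negations; infer_instance

-- ===== CLAIM (what is proved, stated in full; the proofs are below) =====
def Claim_equal_find_words_with_negations : Prop := ∀ (articles : List (List String)) (lexicon_pos : List (String × Int)) (lexicon_neg : List (String × Int)), Dom_find_words_with_negations articles lexicon_pos lexicon_neg → Spec_find_words_with_negations articles lexicon_pos lexicon_neg (find_words_with_negations articles lexicon_pos lexicon_neg)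

-- ===== LEMMAS AND PROOFS =====

-- the shared verdict on one article x and one lowercased lexicon word t:
-- t occurs in x and its first occurrence is not preceded by a negation
def pvKeep (x : List String) (t : String) : Bool :=
  match PySem.List.index? x t with
  | none => false
  | some k => !(decide (0 < k) && pvNegPrev x k)

-- A's inner loop appends exactly the kept lowercased keys, in key order
theorem pvScanA_eq (x : List String) (keys lst : List String) :
    pvScanA x keys lst = lst ++ (keys.map PySem.Str.lower).filter (pvKeep x) := by
  have hstep : (fun (lst : List String) (ns0 : String) =>
      let ns := PySem.Str.lower ns0
      if ns ∈ x then
        match PySem.List.index? x ns with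
        | some position =>
            if decide (0 < position) && pvNegPrev x position then lst else lst ++ [ns]
        | none => lst
      else lst)
      = (fun lst ns0 =>
          if pvKeep x (PySem.Str.lower ns0) then lst ++ [PySem.Str.lower ns0] else lst) := by
    funext lst k
    show (if PySem.Str.lower k ∈ x then _ else _) = _
    rcases h : PySem.List.index? x (PySem.Str.lower k) with _ | pos
    · have hx : PySem.Str.lower k ∉ x := (PySem.List.index?_eq_none_iff _ _).mp h
      have hk : pvKeep x (PySem.Str.lower k) = false := by
        simp only [pvKeep]; rw [h]
      rw [if_neg hx, hk]
      simp
    · have hx : PySem.Str.lower k ∈ x := (PySem.List.index?_isSome_iff x _).mp (by rw [h]; rfl)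
      have hk : pvKeep x (PySem.Str.lower k)
          = !(decide (0 < pos) && pvNegPrev x pos) := by
        simp only [pvKeep]; rw [h]
      rw [if_pos hx, hk]
      show (if decide (0 < pos) && pvNegPrev x pos then lst else lst ++ [PySem.Str.lower k]) = _
      cases (decide (0 < pos) && pvNegPrev x pos) <;> simp
  rw [pvScanA, hstep, PySem.List.foldl_append_if, List.filter_map]
  rfl

-- first-occurrence verdict of the streaming scan started with previous-token state b
def pvKeepFrom (b : Bool) : List String → String → Bool
  | [], _ => false
  | a :: xs, t => if t = a then !b else pvKeepFrom (pvHasNeg a) xs t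

-- the streaming state is summarised by (kept, dropped, prev_negated)
theorem pvKeptStep_spec (x : List String) :
    ∀ (K D : PySem.Set String) (b : Bool) (t : String),
      ((x.foldl pvKeptStep (K, D, b)).1).contains t
        = if K.contains t then true else if D.contains t then false else pvKeepFrom b x t := by
  induction x with
  | nil =>
    intro K D b t
    simp only [List.foldl_nil, pvKeepFrom]
    cases hK : K.contains t <;> cases hD : D.contains t <;> simp
  | cons a xs ih =>
    intro K D b t
    rw [List.foldl_cons]
    by_cases hta : t = a
    · subst hta
      simp only [pvKeptStep]
      cases hK : K.contains t <;> cases hD : D.contains t <;> cases hb : b <;>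
        simp only [hK, hD, hb, Bool.false_or, Bool.true_or, Bool.or_self,
          ite_true, ih, pvKeepFrom] <;>
        simp [(by simpa [PySem.Set.contains_iff] using hK : t ∉ K),
          (by simpa [PySem.Set.contains_iff] using hD : t ∉ D)]
    · have hKadd : ∀ S : PySem.Set String, (PySem.Set.add S a).contains t = S.contains t := by
        intro S
        by_cases hSa : a ∈ S <;>
          simp [PySem.Set.add, PySem.Set.contains_eq_listContains,
            List.contains_eq_mem, hSa, hta]
      simp only [pvKeptStep]
      cases hK : K.contains a <;> cases hD : D.contains a <;> cases hb : b <;>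
        simp only [hK, hD, hb, Bool.false_or, Bool.true_or, Bool.or_self,
          ite_true, ih, hKadd] <;>
        simp [pvKeepFrom, hta]

-- the streaming verdict agrees with the first-index formulation
theorem pvKeepFrom_eq (t : String) :
    ∀ (x : List String) (b : Bool),
      pvKeepFrom b x t
        = (match PySem.List.index? x t with
           | none => false
           | some 0 => !b
           | some (k + 1) => !pvHasNeg (x.getD k "")) := by
  intro x
  induction x with
  | nil => intro b; simp [pvKeepFrom, PySem.List.index?_eq_idxOf?]
  | cons a xs ih =>
    intro b
    by_cases hta : t = a
    · subst hta
      rw [PySem.List.index?_cons_self]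
      simp [pvKeepFrom]
    · have h2 : PySem.List.index? (a :: xs) t
          = (PySem.List.index? xs t).map (fun k => k + 1) :=
        PySem.List.index?_cons_of_ne xs (fun h => hta h.symm)
      rw [show pvKeepFrom b (a :: xs) t = pvKeepFrom (pvHasNeg a) xs t by
            simp [pvKeepFrom, hta],
          ih (pvHasNeg a), h2]
      rcases hidx : PySem.List.index? xs t with _ | k
      · rfl
      · cases k <;> rfl

-- membership in the kept set is exactly A's keep verdict
theorem pvKeptTokens_contains (x : List String) (t : String) :
    (pvKeptTokens x).contains t = pvKeep x t := by
  have h0 : (pvKeptTokens x).contains t = pvKeepFrom false x t := by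
    rw [pvKeptTokens, pvKeptStep_spec x PySem.Set.empty PySem.Set.empty false t]
    rfl
  rw [h0, pvKeepFrom_eq t x false, pvKeep]
  rcases h : PySem.List.index? x t with _ | k
  · rfl
  · cases k with
    | zero => simp
    | succ j =>
      show (!pvHasNeg (x.getD j "")) = !(decide (0 < j + 1) && pvNegPrev x (j + 1))
      simp [pvHasNeg, pvNegPrev]

-- A's accumulated list, folded into a counter, is the article-by-article counting
theorem pvConcatFold (f : List String → List String) (g : PySem.Dict String Int → String → PySem.Dict String Int) :
    ∀ (arts : List (List String)) (l0 : List String) (d : PySem.Dict String Int),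
      (arts.foldl (fun l x => l ++ f x) l0).foldl g d
        = arts.foldl (fun d x => (f x).foldl g d) (l0.foldl g d) := by
  intro arts
  induction arts with
  | nil => intro l0 d; rfl
  | cons x arts ih =>
    intro l0 d
    rw [List.foldl_cons, ih, List.foldl_append, List.foldl_cons]

-- one lexicon side of the whole function
theorem pvSide (articles : List (List String)) (K : List String) :
    PySem.Dict.counter
        ((articles.foldl (fun l x => pvScanA x K l) []).map (fun i => i))
      = articles.foldl
          (fun r x => pvUpdate r ((K.map PySem.Str.lower).filter
            (fun t => (pvKeptTokens x).contains t)))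
          PySem.Dict.empty := by
  have h1 : articles.foldl (fun l x => pvScanA x K l) []
      = articles.foldl (fun l x => l ++ (K.map PySem.Str.lower).filter (pvKeep x)) [] := by
    apply PySem.List.foldl_congr_mem
    intro l x _; exact pvScanA_eq x K l
  have h2 : articles.foldl
        (fun r x => pvUpdate r ((K.map PySem.Str.lower).filter
          (fun t => (pvKeptTokens x).contains t))) PySem.Dict.empty
      = articles.foldl
        (fun r x => pvUpdate r ((K.map PySem.Str.lower).filter (pvKeep x)))
        PySem.Dict.empty := by
    apply PySem.List.foldl_congr_mem
    intro r x _
    congr 1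
    exact List.filter_congr fun t _ => pvKeptTokens_contains x t
  rw [h2, h1, List.map_id', PySem.Dict.counter_eq_foldl, pvConcatFold]
  rfl

-- ===== VERDICT (by name: the statement is the Claim_ definition above) =====
theorem find_words_with_negations_spec : Claim_equal_find_words_with_negations := by
  intro articles lexicon_pos lexicon_neg _
  unfold Spec_find_words_with_negations find_words_with_negations find_words_with_negations_alt
  dsimp only
  have hA : articles.foldl
      (fun (acc : List String × List String) x =>
        (pvScanA x (PySem.Dict.ofList lexicon_pos).keys acc.1,
         pvScanA x (PySem.Dict.ofList lexicon_neg).keys acc.2)) ([], [])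
      = (articles.foldl (fun l x => pvScanA x (PySem.Dict.ofList lexicon_pos).keys l) [],
         articles.foldl (fun l x => pvScanA x (PySem.Dict.ofList lexicon_neg).keys l) []) :=
    PySem.List.foldl_prod_mk (fun l x => pvScanA x (PySem.Dict.ofList lexicon_pos).keys l)
      (fun l x => pvScanA x (PySem.Dict.ofList lexicon_neg).keys l) articles [] []
  have hB : articles.foldl
      (fun (results : PySem.Dict String Int × PySem.Dict String Int) article =>
        (pvUpdate results.1 (((PySem.Dict.ofList lexicon_pos).keys.map PySem.Str.lower).filter
            (fun t => (pvKeptTokens article).contains t)),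
         pvUpdate results.2 (((PySem.Dict.ofList lexicon_neg).keys.map PySem.Str.lower).filter
            (fun t => (pvKeptTokens article).contains t))))
      (PySem.Dict.empty, PySem.Dict.empty)
      = (articles.foldl (fun r article => pvUpdate r
            (((PySem.Dict.ofList lexicon_pos).keys.map PySem.Str.lower).filter
              (fun t => (pvKeptTokens article).contains t))) PySem.Dict.empty,
         articles.foldl (fun r article => pvUpdate r
            (((PySem.Dict.ofList lexicon_neg).keys.map PySem.Str.lower).filter
              (fun t => (pvKeptTokens article).contains t))) PySem.Dict.empty) :=
    PySem.List.foldl_prod_mk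
      (fun r article => pvUpdate r
        (((PySem.Dict.ofList lexicon_pos).keys.map PySem.Str.lower).filter
          (fun t => (pvKeptTokens article).contains t)))
      (fun r article => pvUpdate r
        (((PySem.Dict.ofList lexicon_neg).keys.map PySem.Str.lower).filter
          (fun t => (pvKeptTokens article).contains t)))
      articles PySem.Dict.empty PySem.Dict.empty
  rw [hA, hB]
  dsimp only
  rw [pvSide articles (PySem.Dict.ofList lexicon_pos).keys,
      pvSide articles (PySem.Dict.ofList lexicon_neg).keys]
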